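-- pv_equiv track=rewrite | github.com/Shp2152/Puzzles | canudigitv1/build_clause_graph_report.py | build_word_hubs
-- ===== SOURCE A (Python) =====
-- from collections import Counter, defaultdict
--
-- def build_word_hubs(nodes):
--     counter = Counter()
--     carriers = defaultdict(list)
--     for core, node in nodes.items():
--         for word in node["word_set"]:
--             counter[word] += 1
--             carriers[word].append(core)
--     return counter, carriers
-- ===== SOURCE B (Python) =====
-- from collections import Counter, defaultdict
--
-- def build_word_hubs(nodes):
--     pairs = [(w, core) for core, node in nodes.items() for w in node["word_set"]]
--     order = dict.fromkeys(w for w, _ in pairs)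
--     carriers = defaultdict(list, {w: [c for x, c in pairs if x == w] for w in order})
--     counter = Counter({w: len(cs) for w, cs in carriers.items()})
--     return counter, carriers
-- ===== Notes on version B (the rewrite author's own statement) =====
-- stated objective: alternative
-- what changed: B flattens nodes into a (word, core) pair list, computes the distinct words via dict.fromkeys, builds each carrier list by filtering the pair list per distinct word, and derives the counter from the carriers' lengths, instead of A's single interleaved loop that maintains the counter and carriers maps incrementally.
import Mathlib
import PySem

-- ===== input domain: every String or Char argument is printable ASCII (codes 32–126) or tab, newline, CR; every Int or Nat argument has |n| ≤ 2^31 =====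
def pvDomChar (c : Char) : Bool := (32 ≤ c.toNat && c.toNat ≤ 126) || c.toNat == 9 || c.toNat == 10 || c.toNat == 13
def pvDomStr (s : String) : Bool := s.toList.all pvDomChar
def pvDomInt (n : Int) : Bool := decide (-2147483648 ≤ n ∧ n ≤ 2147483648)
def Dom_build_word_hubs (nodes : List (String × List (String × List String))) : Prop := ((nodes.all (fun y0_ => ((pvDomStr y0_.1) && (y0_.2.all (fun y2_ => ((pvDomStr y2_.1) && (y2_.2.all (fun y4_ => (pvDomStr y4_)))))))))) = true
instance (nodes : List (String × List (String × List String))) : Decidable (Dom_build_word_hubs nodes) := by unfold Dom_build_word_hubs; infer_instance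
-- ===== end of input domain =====

-- B flattens the nodes into a (word, core) pair list first, then groups by each distinct word
-- with a filter pass and derives the counter from the group lengths, instead of A's single
-- interleaved loop maintaining two maps (objective: alternative). Return-value equivalence only.

-- ===== PORT A =====
-- counter = Counter(); carriers = defaultdict(list)
-- for core, node in nodes.items():
--     for word in node["word_set"]:           -- node["word_set"]: first-match lookup; Pre_ guarantees the key exists,
--         counter[word] += 1                  --   so getD "word_set" [] is exact there (Python raises KeyError otherwise)
--         carriers[word].append(core)
def build_word_hubs (nodes : List (String × List (String × List String))) :
    (List (String × Int)) × (List (String × List String)) :=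
  let st :=
    nodes.foldl
      (fun (st : PySem.Dict String Int × PySem.Dict String (List String)) p =>
        ((PySem.Dict.mk p.2).getD "word_set" []).foldl
          (fun st w => (st.1.modify w 0 (· + 1), st.2.modify w [] (· ++ [p.1]))) st)
      (PySem.Dict.empty, PySem.Dict.empty)
  (st.1.items, st.2.items)

-- ===== PORT B =====
-- pairs = [(w, core) for core, node in nodes.items() for w in node["word_set"]]
-- order = dict.fromkeys(w for w, _ in pairs)                  -- PySem.List.dedup = dict.fromkeys order
-- carriers = defaultdict(list, {w: [c for x, c in pairs if x == w] for w in order})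
-- counter = Counter({w: len(cs) for w, cs in carriers.items()})
def build_word_hubs_alt (nodes : List (String × List (String × List String))) :
    (List (String × Int)) × (List (String × List String)) :=
  let pairs := nodes.flatMap (fun p => ((PySem.Dict.mk p.2).getD "word_set" []).map (fun w => (w, p.1)))
  let order := PySem.List.dedup (pairs.map Prod.fst)
  let carriers := order.map (fun w => (w, (pairs.filter (fun q => q.1 == w)).map Prod.snd))
  let counter := carriers.map (fun q => (q.1, (q.2.length : Int)))
  (counter, carriers)

-- ===== PRECONDITION & SPEC =====
-- Pre_ excludes (a) nodes whose assoc list lacks a "word_set" key, on which A (and B) raise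
-- KeyError, and (b) association lists with duplicate outer cores or duplicate inner node keys,
-- whose reading as a Python dict (first-vs-last occurrence) is ambiguous.
def Pre_build_word_hubs (nodes : List (String × List (String × List String))) : Prop :=
  (nodes.map Prod.fst).Nodup ∧
    ∀ p ∈ nodes, (p.2.map Prod.fst).Nodup ∧ "word_set" ∈ p.2.map Prod.fst
instance (nodes : List (String × List (String × List String))) : Decidable (Pre_build_word_hubs nodes) := by unfold Pre_build_word_hubs; infer_instance
def pvWitness_build_word_hubs : (List (String × List (String × List String))) :=
  [("a", [("word_set", ["w", "v"])]), ("b", [("word_set", ["w"])])]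
def Spec_build_word_hubs (nodes : List (String × List (String × List String))) (out : (List (String × Int)) × (List (String × List String))) : Prop := out = build_word_hubs_alt nodes
instance (nodes : List (String × List (String × List String))) (out : (List (String × Int)) × (List (String × List String))) : Decidable (Spec_build_word_hubs nodes out) := by unfold Spec_build_word_hubs; infer_instance

-- ===== CLAIM (what is proved, stated in full; the proofs are below) =====
def Claim_equal_build_word_hubs : Prop := ∀ (nodes : List (String × List (String × List String))), Dom_build_word_hubs nodes → Pre_build_word_hubs nodes → Spec_build_word_hubs nodes (build_word_hubs nodes)

-- ===== LEMMAS AND PROOFS =====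

-- A's nested loop over nodes/words is the fold of its two-map step over B's flattened pair list
theorem pv_flat (nodes : List (String × List (String × List String)))
    (st : PySem.Dict String Int × PySem.Dict String (List String)) :
    nodes.foldl
        (fun (st : PySem.Dict String Int × PySem.Dict String (List String)) p =>
          ((PySem.Dict.mk p.2).getD "word_set" []).foldl
            (fun st w => (st.1.modify w 0 (· + 1), st.2.modify w [] (· ++ [p.1]))) st) st
      = (nodes.flatMap (fun p => ((PySem.Dict.mk p.2).getD "word_set" []).map (fun w => (w, p.1)))).foldl
          (fun st q => (st.1.modify q.1 0 (· + 1), st.2.modify q.1 [] (· ++ [q.2]))) st := by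
  rw [List.foldl_flatMap]
  simp only [List.foldl_map]

-- the carriers fold over the pair list is the filter-based group-by over the distinct words
theorem pv_items (ps : List (String × String)) :
    (ps.foldl (fun (d : PySem.Dict String (List String)) q => d.modify q.1 [] (· ++ [q.2]))
        PySem.Dict.empty).items
      = (PySem.List.dedup (ps.map Prod.fst)).map
          (fun w => (w, (ps.filter (fun q => q.1 == w)).map Prod.snd)) := by
  have hnd : (ps.foldl (fun (d : PySem.Dict String (List String)) q => d.modify q.1 [] (· ++ [q.2]))
      PySem.Dict.empty).keys.Nodup :=
    PySem.Dict.nodup_keys_foldl_modify_key ps Prod.fst [] (fun _ q => (· ++ [q.2]))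
      PySem.Dict.empty (by simp)
  rw [PySem.Dict.items_eq_map_keys _ hnd []]
  have hk := PySem.Dict.keys_foldl_modify_key ps Prod.fst [] (fun _ q => (· ++ [q.2]))
      PySem.Dict.empty
  rw [hk]
  have hupd : PySem.Set.update (PySem.Dict.empty : PySem.Dict String (List String)).keys
      (ps.map Prod.fst) = PySem.List.dedup (ps.map Prod.fst) := by
    simp only [pysem, PySem.Set.update, PySem.Dict.keys_empty, PySem.Set.ofList,
      List.foldl_map]
  rw [hupd]
  refine List.map_congr_left (fun w _ => ?_)
  rw [PySem.Dict.getD_foldl_modify_append]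
  simp

-- ===== VERDICT (by name: the statement is the Claim_ definition above) =====
theorem build_word_hubs_spec : Claim_equal_build_word_hubs := by
  intro nodes _ _
  simp only [Spec_build_word_hubs, build_word_hubs, build_word_hubs_alt, pv_flat]
  generalize (nodes.flatMap (fun p => ((PySem.Dict.mk p.2).getD "word_set" []).map (fun w => (w, p.1)))) = ps
  rw [PySem.List.foldl_prod_mk
    (fun (d : PySem.Dict String Int) (q : String × String) => d.modify q.1 0 (· + 1))
    (fun (d : PySem.Dict String (List String)) (q : String × String) => d.modify q.1 [] (· ++ [q.2]))
    ps PySem.Dict.empty PySem.Dict.empty]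
  refine Prod.ext ?_ ?_
  · -- counter component
    have hc : ps.foldl
        (fun (d : PySem.Dict String Int) q => d.modify q.1 0 (· + 1)) PySem.Dict.empty
        = PySem.Dict.counter (ps.map Prod.fst) := by
      rw [PySem.Dict.counter_eq_foldl, List.foldl_map]
    rw [hc, PySem.Dict.items_counter, pv_items]
    rw [List.map_map]
    refine List.map_congr_left (fun w _ => ?_)
    simp [List.count, List.countP_eq_length_filter, List.filter_map, Function.comp]
    exact congrArg List.length (List.filter_congr (fun q _ => rfl))
  · exact pv_items _
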